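-- pv_equiv track=rewrite | github.com/rubelw/OSSS | src/OSSS/ai/agents/query_data/handlers/permissions_handler.py | _select_permissions_fields
-- ===== SOURCE A (Python) =====
-- from typing import Any, Dict, List, Sequence
--
-- def _select_permissions_fields(rows: Sequence[Dict[str, Any]]) -> List[str]:
--     if not rows:
--         return []
--
--     preferred_order = [
--         "id",
--         "subject_type",
--         "subject_id",
--         "subject_code",
--         "resource_type",
--         "resource_id",
--         "resource_code",
--         "action",
--         "scope",
--         "effect",
--         "status",
--         "created_at",
--         "updated_at",
--     ]
--
--     all_keys: List[str] = []
--     for r in rows: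
--         for k in r.keys():
--             if k not in all_keys:
--                 all_keys.append(k)
--
--     ordered: List[str] = [c for c in preferred_order if c in all_keys]
--     ordered.extend(c for c in all_keys if c not in ordered)
--     return ordered
-- ===== SOURCE B (Python) =====
-- from typing import Any, Dict, List, Sequence
--
-- def _select_permissions_fields(rows: Sequence[Dict[str, Any]]) -> List[str]:
--     preferred_order = [
--         "id",
--         "subject_type",
--         "subject_id",
--         "subject_code",
--         "resource_type",
--         "resource_id",
--         "resource_code",
--         "action",
--         "scope",
--         "effect",
--         "status",
--         "created_at",
--         "updated_at",
--     ]
--     rank = {k: i for i, k in enumerate(preferred_order)}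
--     seen = list(dict.fromkeys(k for r in rows for k in r))
--     return sorted(seen, key=lambda k: rank.get(k, len(preferred_order)))
-- ===== Notes on version B (the rewrite author's own statement) =====
-- stated objective: faster
-- what changed: Replaced A's quadratic append-if-absent key collection and its two filter/membership passes with a one-pass dict-based ordered dedup followed by a single stable sort keyed by each key's preferred rank (sentinel rank for non-preferred keys preserves first-seen order via sort stability).
import Mathlib
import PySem

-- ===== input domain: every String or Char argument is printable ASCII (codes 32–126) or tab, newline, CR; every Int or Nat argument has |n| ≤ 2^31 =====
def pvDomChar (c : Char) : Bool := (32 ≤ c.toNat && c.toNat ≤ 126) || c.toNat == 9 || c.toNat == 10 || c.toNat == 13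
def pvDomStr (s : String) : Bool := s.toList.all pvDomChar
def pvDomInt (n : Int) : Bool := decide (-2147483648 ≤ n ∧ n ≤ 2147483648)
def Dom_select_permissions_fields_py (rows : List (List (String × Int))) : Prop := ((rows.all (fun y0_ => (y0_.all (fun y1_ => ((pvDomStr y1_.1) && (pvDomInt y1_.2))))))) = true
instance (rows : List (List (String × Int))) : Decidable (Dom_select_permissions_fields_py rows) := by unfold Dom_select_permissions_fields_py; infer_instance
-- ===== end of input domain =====

-- B replaces A's quadratic append-if-absent key collection and two filter passes by a
-- one-pass ordered dedup plus one stable sort keyed by preferred rank (measured faster).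

-- ===== PORT A =====
def pvPreferredA : List String :=
  ["id", "subject_type", "subject_id", "subject_code", "resource_type", "resource_id",
   "resource_code", "action", "scope", "effect", "status", "created_at", "updated_at"]

def select_permissions_fields_py (rows : List (List (String × Int))) : List String :=
  if rows = [] then []
  else
    -- all_keys: append each key not yet present, row by row
    let all_keys : List String :=
      rows.foldl (fun acc r =>
        r.foldl (fun acc2 kv => if kv.1 ∈ acc2 then acc2 else acc2 ++ [kv.1]) acc) []
    -- ordered = [c for c in preferred_order if c in all_keys]
    let ordered : List String := pvPreferredA.filter (fun c => decide (c ∈ all_keys))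
    -- ordered.extend(c for c in all_keys if c not in ordered): the generator sees the
    -- growing list, so this is a fold with the accumulator itself as the membership test
    all_keys.foldl (fun o c => if c ∈ o then o else o ++ [c]) ordered

-- ===== PORT B =====
def pvPreferredB : List String :=
  ["id", "subject_type", "subject_id", "subject_code", "resource_type", "resource_id",
   "resource_code", "action", "scope", "effect", "status", "created_at", "updated_at"]

-- rank = {k: i for i, k in enumerate(preferred_order)}
def pvRankB : PySem.Dict String Int :=
  (PySem.List.enumerate pvPreferredB).foldl (fun d p => d.insert p.2 p.1) PySem.Dict.empty

def select_permissions_fields_py_alt (rows : List (List (String × Int))) : List String :=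
  -- seen = list(dict.fromkeys(k for r in rows for k in r))
  let seen : List String := PySem.List.dedup (rows.flatMap (fun r => r.map Prod.fst))
  -- sorted(seen, key=lambda k: rank.get(k, len(preferred_order)))  (stable sort)
  PySem.List.sorted seen (fun k => pvRankB.getD k (pvPreferredB.length : Int))

-- ===== PRECONDITION & SPEC =====
def Spec_select_permissions_fields_py (rows : List (List (String × Int))) (out : List String) : Prop := out = select_permissions_fields_py_alt rows
instance (rows : List (List (String × Int))) (out : List String) : Decidable (Spec_select_permissions_fields_py rows out) := by unfold Spec_select_permissions_fields_py; infer_instance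

-- ===== CLAIM (what is proved, stated in full; the proofs are below) =====
def Claim_equal_select_permissions_fields_py : Prop := ∀ (rows : List (List (String × Int))), Dom_select_permissions_fields_py rows → Spec_select_permissions_fields_py rows (select_permissions_fields_py rows)

-- ===== LEMMAS AND PROOFS =====

-- B's sort key, and the target shape both programs produce on a duplicate-free key list
def pvKey (k : String) : Int := pvRankB.getD k (pvPreferredB.length : Int)

def pvOrd (xs : List String) : List String :=
  pvPreferredB.filter (fun c => decide (c ∈ xs)) ++ xs.filter (fun c => decide (c ∉ pvPreferredB))

-- the rank dict realises "index in the preferred list, 13 (= its length) if absent"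
theorem pvKey_eq (a : String) : pvKey a = ((List.idxOf a pvPreferredB : Nat) : Int) := by
  by_cases h : a ∈ pvPreferredB
  · simp only [pvPreferredB, List.mem_cons, List.not_mem_nil, or_false] at h
    rcases h with h|h|h|h|h|h|h|h|h|h|h|h|h <;> subst h <;> decide
  · have hlen : List.idxOf a pvPreferredB = pvPreferredB.length := List.idxOf_eq_length h
    rw [hlen]
    simp only [pvPreferredB, List.mem_cons, List.not_mem_nil, or_false, not_or] at h
    obtain ⟨h1,h2,h3,h4,h5,h6,h7,h8,h9,h10,h11,h12,h13⟩ := h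
    have e : pvRankB = PySem.Dict.mk [("id",(0:Int)),("subject_type",1),("subject_id",2),
      ("subject_code",3),("resource_type",4),("resource_id",5),("resource_code",6),
      ("action",7),("scope",8),("effect",9),("status",10),("created_at",11),("updated_at",12)] := by
      rfl
    show pvRankB.getD a (pvPreferredB.length : Int) = _
    rw [e]
    have b1 : ("id" == a) = false := beq_eq_false_iff_ne.mpr (fun hh => h1 hh.symm)
    have b2 : ("subject_type" == a) = false := beq_eq_false_iff_ne.mpr (fun hh => h2 hh.symm)
    have b3 : ("subject_id" == a) = false := beq_eq_false_iff_ne.mpr (fun hh => h3 hh.symm)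
    have b4 : ("subject_code" == a) = false := beq_eq_false_iff_ne.mpr (fun hh => h4 hh.symm)
    have b5 : ("resource_type" == a) = false := beq_eq_false_iff_ne.mpr (fun hh => h5 hh.symm)
    have b6 : ("resource_id" == a) = false := beq_eq_false_iff_ne.mpr (fun hh => h6 hh.symm)
    have b7 : ("resource_code" == a) = false := beq_eq_false_iff_ne.mpr (fun hh => h7 hh.symm)
    have b8 : ("action" == a) = false := beq_eq_false_iff_ne.mpr (fun hh => h8 hh.symm)
    have b9 : ("scope" == a) = false := beq_eq_false_iff_ne.mpr (fun hh => h9 hh.symm)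
    have b10 : ("effect" == a) = false := beq_eq_false_iff_ne.mpr (fun hh => h10 hh.symm)
    have b11 : ("status" == a) = false := beq_eq_false_iff_ne.mpr (fun hh => h11 hh.symm)
    have b12 : ("created_at" == a) = false := beq_eq_false_iff_ne.mpr (fun hh => h12 hh.symm)
    have b13 : ("updated_at" == a) = false := beq_eq_false_iff_ne.mpr (fun hh => h13 hh.symm)
    simp [PySem.Dict.getD, PySem.Dict.get?, List.find?,
      b1, b2, b3, b4, b5, b6, b7, b8, b9, b10, b11, b12, b13, pvPreferredB]

theorem pvInsertBy_split {α : Type} (bf : α → α → Bool) (x : α) (l1 l2 : List α)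
    (h1 : ∀ a ∈ l1, bf x a = false) (h2 : ∀ a ∈ l2, bf x a = true) :
    PySem.List.insertBy bf x (l1 ++ l2) = l1 ++ x :: l2 := by
  induction l1 with
  | nil =>
    cases l2 with
    | nil => simp [PySem.List.insertBy]
    | cons y t => simp [PySem.List.insertBy, h2 y (by simp)]
  | cons a t ih =>
    have ha : bf x a = false := h1 a (by simp)
    simp only [List.cons_append, PySem.List.insertBy, ha, Bool.false_eq_true, if_false]
    rw [ih (fun b hb => h1 b (by simp [hb]))]

theorem pvIdxOf_lt_of_mem_take {l : List String} {j : Nat} {a : String}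
    (hn : l.Nodup) (ha : a ∈ l.take j) : List.idxOf a l < j := by
  obtain ⟨i, hi, hget⟩ := List.getElem_of_mem ha
  rw [List.length_take] at hi
  have hij : i < j := lt_of_lt_of_le hi (min_le_left _ _)
  have hi' : i < l.length := lt_of_lt_of_le hi (min_le_right _ _)
  have : (l.take j)[i] = l[i] := List.getElem_take
  rw [this] at hget
  subst hget
  have := List.Nodup.idxOf_getElem hn i hi'
  omega

theorem pvIdxOf_gt_of_mem_drop {l : List String} {j : Nat} {a : String}
    (hn : l.Nodup) (ha : a ∈ l.drop (j+1)) : j < List.idxOf a l := by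
  obtain ⟨i, hi, hget⟩ := List.getElem_of_mem ha
  have hi' : j + 1 + i < l.length := by
    have := List.length_drop (l := l) (i := j+1); omega
  have : (l.drop (j+1))[i] = l[j+1+i] := List.getElem_drop ..
  rw [this] at hget
  subst hget
  have := List.Nodup.idxOf_getElem hn (j+1+i) hi'
  omega

-- the insertion step: inserting a fresh key into pvOrd xs lands exactly where pvOrd (xs ++ [x]) has it
theorem pvOrd_step (xs : List String) (x : String) (hx : x ∉ xs) :
    PySem.List.insertBy (fun a b => decide (pvKey a < pvKey b)) x (pvOrd xs) = pvOrd (xs ++ [x]) := by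
  have hPnd : pvPreferredB.Nodup := by decide
  by_cases hp : x ∈ pvPreferredB
  · set j := List.idxOf x pvPreferredB with hj
    have hjlt : j < pvPreferredB.length := List.idxOf_lt_length_of_mem hp
    have hsplit : pvPreferredB = pvPreferredB.take j ++ x :: pvPreferredB.drop (j+1) := by
      conv_lhs => rw [← List.take_append_drop j pvPreferredB]
      congr 1
      rw [List.drop_eq_getElem_cons hjlt]
      congr 1
      exact List.getElem_idxOf hjlt
    have hxtake : x ∉ pvPreferredB.take j := fun h => by
      have := pvIdxOf_lt_of_mem_take hPnd h; omega
    have hxdrop : x ∉ pvPreferredB.drop (j+1) := fun h => by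
      have := pvIdxOf_gt_of_mem_drop hPnd h; omega
    -- rewrite both pvOrd's preferred part through the split
    have hfT : ∀ (ys : List String), x ∉ ys →
        (pvPreferredB.take j).filter (fun c => decide (c ∈ ys ++ [x]))
          = (pvPreferredB.take j).filter (fun c => decide (c ∈ ys)) := by
      intro ys _; apply List.filter_congr; intro c hc
      have : c ≠ x := fun h => hxtake (h ▸ hc)
      simp [List.mem_append, this]
    have hfD : ∀ (ys : List String), x ∉ ys →
        (pvPreferredB.drop (j+1)).filter (fun c => decide (c ∈ ys ++ [x]))
          = (pvPreferredB.drop (j+1)).filter (fun c => decide (c ∈ ys)) := by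
      intro ys _; apply List.filter_congr; intro c hc
      have : c ≠ x := fun h => hxdrop (h ▸ hc)
      simp [List.mem_append, this]
    have hN : (xs ++ [x]).filter (fun c => decide (c ∉ pvPreferredB))
        = xs.filter (fun c => decide (c ∉ pvPreferredB)) := by
      simp [List.filter_append, hp]
    -- assemble
    rw [pvOrd, pvOrd, hN]
    set N := xs.filter (fun c => decide (c ∉ pvPreferredB))
    conv_lhs => rw [hsplit]
    conv_rhs => rw [hsplit]
    simp only [List.filter_append, List.filter_cons]
    rw [hfT xs hx, hfD xs hx]
    have hxmem : decide (x ∈ xs ++ [x]) = true := by simp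
    have hxnot : decide (x ∈ xs) = false := by simp [hx]
    rw [hxmem, hxnot]
    simp only [if_true, List.append_assoc, List.cons_append]
    apply pvInsertBy_split
    · intro a ha
      have ha' : a ∈ pvPreferredB.take j := List.mem_of_mem_filter ha
      have hlt := pvIdxOf_lt_of_mem_take hPnd ha'
      simp only [decide_eq_false_iff_not, not_lt, pvKey_eq]
      exact_mod_cast hlt.le
    · intro a ha
      simp only [List.mem_append] at ha
      have hgt : j < List.idxOf a pvPreferredB := by
        rcases ha with ha | ha
        · exact pvIdxOf_gt_of_mem_drop hPnd (List.mem_of_mem_filter ha)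
        · have ha' : a ∉ pvPreferredB := by
            have h2 := (List.mem_filter.mp ha).2
            simpa using h2
          rw [List.idxOf_eq_length ha']; omega
      simp only [decide_eq_true_eq, pvKey_eq]
      exact_mod_cast hgt
  · -- x not preferred: it goes to the very end
    have hall : ∀ a ∈ pvOrd xs, (fun a b => decide (pvKey a < pvKey b)) x a = false := by
      intro a _
      simp only [decide_eq_false_iff_not, not_lt, pvKey_eq]
      have h1 : List.idxOf x pvPreferredB = pvPreferredB.length := List.idxOf_eq_length hp
      have h2 : List.idxOf a pvPreferredB ≤ pvPreferredB.length := List.idxOf_le_length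
      rw [h1]; exact_mod_cast h2
    rw [PySem.List.insertBy_of_forall_not_before _ _ _ hall]
    rw [pvOrd, pvOrd]
    have hP : pvPreferredB.filter (fun c => decide (c ∈ xs ++ [x]))
        = pvPreferredB.filter (fun c => decide (c ∈ xs)) := by
      apply List.filter_congr; intro c hc
      have : c ≠ x := fun h => hp (h ▸ hc)
      simp [List.mem_append, this]
    rw [hP, List.filter_append]
    simp [hp]

-- B's stable sort on a duplicate-free list is exactly pvOrd
theorem pvSorted_eq_ord (xs : List String) (h : xs.Nodup) :
    PySem.List.sorted xs pvKey = pvOrd xs := by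
  induction xs using List.reverseRecOn with
  | nil => rfl
  | append_singleton xs x ih =>
    have hx : x ∉ xs := by simp [List.nodup_append] at h; tauto
    have hnd : xs.Nodup := (List.nodup_append.mp h).1
    rw [PySem.List.sorted_eq_foldl_insertBy, List.foldl_append, ← PySem.List.sorted_eq_foldl_insertBy,
      ih hnd]
    simp only [List.foldl_cons, List.foldl_nil]
    exact pvOrd_step xs x hx

-- A's nested append-if-absent loops build exactly the ordered dedup of all keys
theorem pvAllKeys_eq (rows : List (List (String × Int))) :
    rows.foldl (fun acc r =>
        r.foldl (fun acc2 kv => if kv.1 ∈ acc2 then acc2 else acc2 ++ [kv.1]) acc) []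
      = PySem.List.dedup (rows.flatMap (fun r => r.map Prod.fst)) := by
  rw [PySem.List.dedup, PySem.Set.ofList, List.foldl_flatMap]
  congr 1
  funext acc r
  rw [List.foldl_map]
  congr 1
  funext acc2 kv
  simp [PySem.Set.add, PySem.Set.contains]

-- A's extend-with-generator loop appends the not-yet-present elements in order
theorem pvExtend_fold (ys : List String) (hnd : ys.Nodup) : ∀ acc : List String,
    ys.foldl (fun o c => if c ∈ o then o else o ++ [c]) acc
      = acc ++ ys.filter (fun c => decide (c ∉ acc)) := by
  induction ys with
  | nil => intro acc; simp
  | cons c t ih =>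
    intro acc
    have hct : c ∉ t := (List.nodup_cons.mp hnd).1
    have hnd' : t.Nodup := (List.nodup_cons.mp hnd).2
    by_cases hc : c ∈ acc
    · simp only [List.foldl_cons, if_pos hc, List.filter_cons]
      rw [ih hnd' acc]
      simp [hc]
    · simp only [List.foldl_cons, if_neg hc, List.filter_cons]
      rw [ih hnd' (acc ++ [c])]
      have : t.filter (fun a => decide (a ∉ acc ++ [c])) = t.filter (fun a => decide (a ∉ acc)) := by
        apply List.filter_congr; intro a ha
        have : a ≠ c := fun h => hct (h ▸ ha)
        simp [List.mem_append, this]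
      rw [this]
      simp [hc]

-- ===== VERDICT (by name: the statement is the Claim_ definition above) =====
theorem select_permissions_fields_py_spec : Claim_equal_select_permissions_fields_py := by
  intro rows _
  unfold Spec_select_permissions_fields_py select_permissions_fields_py select_permissions_fields_py_alt
  by_cases hr : rows = []
  · subst hr; rfl
  · rw [if_neg hr]
    have hseen := pvAllKeys_eq rows
    set seen := PySem.List.dedup (rows.flatMap (fun r => r.map Prod.fst)) with hseendef
    have hnd : seen.Nodup := PySem.List.nodup_dedup _
    rw [hseen]
    show (seen.foldl (fun o c => if c ∈ o then o else o ++ [c])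
        (pvPreferredA.filter (fun c => decide (c ∈ seen)))) = _
    rw [pvExtend_fold seen hnd]
    have hfix : seen.filter (fun c => decide (c ∉ pvPreferredA.filter (fun c => decide (c ∈ seen))))
        = seen.filter (fun c => decide (c ∉ pvPreferredB)) := by
      apply List.filter_congr; intro c hc
      simp [List.mem_filter, hc, pvPreferredA, pvPreferredB]
    rw [hfix]
    have : PySem.List.sorted seen (fun k => pvRankB.getD k (pvPreferredB.length : Int))
        = pvOrd seen := pvSorted_eq_ord seen hnd
    rw [this, pvOrd]
    rfl
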